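-- pv_equiv track=rewrite | github.com/leo-leung04/Abstain-R1 | run/evaluate_with_math_verify.py | has_required_tags
-- ===== SOURCE A (Python) =====
-- def has_required_tags(text: str) -> bool:
--     """检查文本是否包含正确格式的 <thinking> 和 <answer> 标签."""
--     if not isinstance(text, str):
--         return False
--
--     t_open = text.count("<thinking>")
--     t_close = text.count("</thinking>")
--     a_open = text.count("<answer>")
--     a_close = text.count("</answer>")
--
--     if any(count != 1 for count in (t_open, t_close, a_open, a_close)):
--         return False
--
--     t_open_idx = text.find("<thinking>")
--     t_close_idx = text.find("</thinking>", t_open_idx + len("<thinking>"))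
--     a_open_idx = text.find("<answer>", t_close_idx + len("</thinking>"))
--     a_close_idx = text.find("</answer>", a_open_idx + len("<answer>"))
--
--     return min(t_open_idx, t_close_idx, a_open_idx, a_close_idx) != -1 and (
--         t_open_idx < t_close_idx < a_open_idx < a_close_idx
--     )
-- ===== SOURCE B (Python) =====
-- _TAGS = ("<thinking>", "</thinking>", "<answer>", "</answer>")
--
--
-- def has_required_tags(text: str) -> bool:
--     """Single left-to-right tokenizer scan: collect every tag occurrence in
--     positional order and require the event sequence to be exactly the four
--     tags, once each, in the canonical order."""
--     if not isinstance(text, str):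
--         return False
--     events = []
--     for i in range(len(text)):
--         for tag in _TAGS:
--             if text.startswith(tag, i):
--                 events.append(tag)
--     return events == list(_TAGS)
-- ===== Notes on version B (the rewrite author's own statement) =====
-- stated objective: alternative
-- what changed: A's staged passes (four substring counts, then a chain of find calls with offsets, a four-way min and an index-comparison chain) are replaced by a single left-to-right tokenizer scan that collects every tag occurrence into an event list and compares that event sequence with the canonical [open-thinking, close-thinking, open-answer, close-answer]; no count, find or index arithmetic remains.
import Mathlib
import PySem

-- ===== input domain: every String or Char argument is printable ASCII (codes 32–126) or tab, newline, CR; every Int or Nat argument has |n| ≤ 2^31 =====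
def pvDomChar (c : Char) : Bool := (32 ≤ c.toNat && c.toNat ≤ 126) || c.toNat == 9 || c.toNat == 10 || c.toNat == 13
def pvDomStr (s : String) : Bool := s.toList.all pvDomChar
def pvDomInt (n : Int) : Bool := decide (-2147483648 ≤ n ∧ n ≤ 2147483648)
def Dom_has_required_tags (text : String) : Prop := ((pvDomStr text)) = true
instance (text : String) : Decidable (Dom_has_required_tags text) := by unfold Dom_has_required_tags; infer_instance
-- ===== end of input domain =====

-- B replaces A's staged passes (four substring counts, then a chain of find calls with
-- offsets, a four-way min and an index-comparison chain) by a single left-to-right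
-- tokenizer scan that collects every tag occurrence into an event list and compares it
-- with the canonical tag sequence (alternative decomposition, same cost).
-- The isinstance guard of the Pythons is vacuous under the String type and is not ported.

-- ===== PORT A =====
def has_required_tags (text : String) : Bool :=
  let t_open := PySem.Str.count text "<thinking>"
  let t_close := PySem.Str.count text "</thinking>"
  let a_open := PySem.Str.count text "<answer>"
  let a_close := PySem.Str.count text "</answer>"
  if t_open ≠ 1 ∨ t_close ≠ 1 ∨ a_open ≠ 1 ∨ a_close ≠ 1 then false
  else
    let t_open_idx := PySem.Str.find text "<thinking>"
    let t_close_idx := PySem.Str.findFrom text "</thinking>" (t_open_idx + (PySem.Str.len "<thinking>" : Int))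
    let a_open_idx := PySem.Str.findFrom text "<answer>" (t_close_idx + (PySem.Str.len "</thinking>" : Int))
    let a_close_idx := PySem.Str.findFrom text "</answer>" (a_open_idx + (PySem.Str.len "<answer>" : Int))
    decide (min (min (min t_open_idx t_close_idx) a_open_idx) a_close_idx ≠ -1 ∧
      (t_open_idx < t_close_idx ∧ t_close_idx < a_open_idx ∧ a_open_idx < a_close_idx))

-- ===== PORT B =====
-- the tuple _TAGS of Source B (as lists of characters)
def pvTags : List (List Char) :=
  [['<', 't', 'h', 'i', 'n', 'k', 'i', 'n', 'g', '>'],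
   ['<', '/', 't', 'h', 'i', 'n', 'k', 'i', 'n', 'g', '>'],
   ['<', 'a', 'n', 's', 'w', 'e', 'r', '>'],
   ['<', '/', 'a', 'n', 's', 'w', 'e', 'r', '>']]

-- `range(len(text))` is ported as `List.range` and `text.startswith(tag, i)` (0 ≤ i <
-- len(text)) as `tag.isPrefixOf` of the suffix at i — both exact there.
def has_required_tags_alt (text : String) : Bool :=
  let L := text.toList
  let events := (List.range L.length).foldl
    (fun acc i =>
      pvTags.foldl (fun acc tag => if tag.isPrefixOf (L.drop i) then acc ++ [tag] else acc) acc)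
    []
  events == pvTags

-- ===== PRECONDITION & SPEC =====
def Spec_has_required_tags (text : String) (out : Bool) : Prop := out = has_required_tags_alt text
instance (text : String) (out : Bool) : Decidable (Spec_has_required_tags text out) := by unfold Spec_has_required_tags; infer_instance

-- ===== CLAIM (what is proved, stated in full; the proofs are below) =====
def Claim_equal_has_required_tags : Prop := ∀ (text : String), Dom_has_required_tags text → Spec_has_required_tags text (has_required_tags text)

-- ===== LEMMAS AND PROOFS =====

-- `pvP L t i`: tag t occurs in L at position i
def pvP (L t : List Char) (i : Nat) : Bool := t.isPrefixOf (L.drop i)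

-- the (increasing) list of all positions of tag t in L
def pvS (L t : List Char) : List Nat := (List.range L.length).filter (pvP L t)

-- the tags matching at position i, in pvTags order
def pvG (L : List Char) (i : Nat) : List (List Char) :=
  pvTags.filter (fun t => t.isPrefixOf (L.drop i))

theorem pvTags_ne_nil : ∀ t ∈ pvTags, t ≠ [] := by decide
theorem pvTags_sep : ∀ u ∈ pvTags, ∀ v ∈ pvTags, ∀ k, k < u.length → 0 < k →
    v.isPrefixOf (u.drop k) = false ∧ (u.drop k).isPrefixOf v = false := by decide
theorem pvTags_noprefix : ∀ u ∈ pvTags, ∀ v ∈ pvTags, u.isPrefixOf v = true → u = v := by decide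

theorem pvP_bound {L t : List Char} {i : Nat} (ht : t ∈ pvTags) (h : pvP L t i = true) :
    i < L.length ∧ i + t.length ≤ L.length := by
  have hp : t <+: L.drop i := by simpa [pvP, List.isPrefixOf_iff_prefix] using h
  have hlen := hp.length_le
  rw [List.length_drop] at hlen
  have htl : 0 < t.length := List.length_pos_of_ne_nil (pvTags_ne_nil t ht)
  constructor <;> omega

theorem pvSep_match {L u v : List Char} {i j : Nat} (hu : u ∈ pvTags) (hv : v ∈ pvTags)
    (hi : pvP L u i = true) (hj : pvP L v j = true) (hij : i < j) : i + u.length ≤ j := by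
  by_contra hcon
  set k := j - i with hk
  have hk0 : 0 < k := by omega
  have hku : k < u.length := by omega
  obtain ⟨r, hr⟩ : u <+: L.drop i := by simpa [pvP, List.isPrefixOf_iff_prefix] using hi
  have hdj : L.drop j = u.drop k ++ r := by
    have : L.drop j = (L.drop i).drop k := by rw [List.drop_drop]; congr 1; omega
    rw [this, ← hr, List.drop_append_of_le_length (by omega)]
  have hvp : v <+: u.drop k ++ r := by
    have := hj; simp only [pvP, List.isPrefixOf_iff_prefix] at this; rwa [hdj] at this
  have hsep := pvTags_sep u hu v hv k hku hk0
  rcases Nat.lt_or_ge (u.drop k).length v.length with hlt | hle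
  · -- u.drop k is a prefix of v
    obtain ⟨r', hr'⟩ := hvp
    have : u.drop k = v.take (u.drop k).length := by
      have h1 : (List.drop k u ++ r).take (List.drop k u).length = List.drop k u := List.take_left
      rw [← hr', List.take_append_of_le_length (le_of_lt hlt)] at h1
      exact h1.symm
    have : u.drop k <+: v := List.prefix_iff_eq_take.mpr this
    rw [← List.isPrefixOf_iff_prefix] at this
    simp [hsep.2] at this
  · -- v is a prefix of u.drop k
    have : v = (u.drop k).take v.length := by
      have := List.prefix_iff_eq_take.mp hvp
      rwa [List.take_append_of_le_length hle] at this
    have : v <+: u.drop k := List.prefix_iff_eq_take.mpr this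
    rw [← List.isPrefixOf_iff_prefix] at this
    simp [hsep.1] at this

theorem pvUniqueTag {L u v : List Char} {i : Nat} (hu : u ∈ pvTags) (hv : v ∈ pvTags)
    (hi : pvP L u i = true) (hj : pvP L v i = true) : u = v := by
  have hup : u <+: L.drop i := by simpa [pvP, List.isPrefixOf_iff_prefix] using hi
  have hvp : v <+: L.drop i := by simpa [pvP, List.isPrefixOf_iff_prefix] using hj
  rcases List.prefix_or_prefix_of_prefix hup hvp with h | h
  · exact pvTags_noprefix u hu v hv (List.isPrefixOf_iff_prefix.mpr h)
  · exact (pvTags_noprefix v hv u hu (List.isPrefixOf_iff_prefix.mpr h)).symm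

theorem pvFilterRange_singleton (q : Nat → Bool) (m x : Nat) (hx : x < m) (hq : q x = true)
    (huniq : ∀ y, y < m → q y = true → y = x) : (List.range m).filter q = [x] := by
  have hpw : ((List.range m).filter q).Pairwise (· < ·) :=
    List.Pairwise.sublist List.filter_sublist List.pairwise_lt_range
  have hnd : ((List.range m).filter q).Nodup := hpw.imp Nat.ne_of_lt
  refine List.Perm.eq_of_pairwise (le := (· < ·))
    (fun a b _ _ hab hba => absurd hba (Nat.lt_asymm hab)) hpw (by simp) ?_
  rw [List.perm_ext_iff_of_nodup hnd (by simp)]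
  intro a
  simp only [List.mem_filter, List.mem_range, List.mem_singleton]
  constructor
  · rintro ⟨ha, hqa⟩; exact huniq a ha hqa
  · rintro rfl; exact ⟨hx, hq⟩

theorem pvS_mem {L t : List Char} {p i : Nat} (ht : t ∈ pvTags) (hS : pvS L t = [p]) :
    pvP L t i = true ↔ i = p := by
  constructor
  · intro h
    have hi : i ∈ pvS L t := by
      simp only [pvS, List.mem_filter, List.mem_range]
      exact ⟨(pvP_bound ht h).1, h⟩
    rw [hS] at hi; simpa using hi
  · rintro rfl
    have : i ∈ pvS L t := by rw [hS]; simp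
    simp only [pvS, List.mem_filter] at this
    exact this.2

theorem pvCount_go (t : List Char) (ht : t ∈ pvTags) :
    ∀ fuel (l : List Char), l.length ≤ fuel → ∀ acc,
      PySem.Chars.count.go t fuel l acc = acc + (List.range l.length).countP (pvP l t) := by
  intro fuel
  induction fuel with
  | zero =>
    intro l hl acc
    have : l = [] := List.eq_nil_of_length_eq_zero (by omega)
    subst this
    rfl
  | succ fuel ih =>
    intro l hl acc
    cases l with
    | nil => rfl
    | cons c tl =>
      rw [PySem.Chars.count.go]
      have hlc : (c :: tl).length = tl.length + 1 := rfl
      have htne := pvTags_ne_nil t ht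
      have htl : 0 < t.length := List.length_pos_of_ne_nil htne
      by_cases hp : t.isPrefixOf (c :: tl) = true
      · rw [if_pos hp]
        have hple : t.length ≤ (c :: tl).length :=
          (List.isPrefixOf_iff_prefix.mp hp).length_le
        have hfl : (List.drop t.length (c :: tl)).length ≤ fuel := by
          rw [List.length_drop]; omega
        rw [ih _ hfl]
        set l' := c :: tl with hl'
        set m := t.length with hm
        have hsplit : List.range l'.length = List.range m ++ (List.range (l'.length - m)).map (m + ·) := by
          rw [← List.range_add]; congr 1; omega
        have h1 : (List.range m).countP (pvP l' t) = 1 := by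
          have hcongr : ∀ k ∈ List.range m, pvP l' t k = true ↔ (k == 0) = true := by
            intro k hk
            rw [List.mem_range] at hk
            cases k with
            | zero => simp [pvP, hp]
            | succ k' =>
              have hfalse : pvP l' t (k' + 1) = false := by
                by_contra hne
                have hmk : pvP l' t (k' + 1) = true := by
                  cases h : pvP l' t (k' + 1) <;> simp_all
                have h0 : pvP l' t 0 = true := by simpa [pvP] using hp
                have := pvSep_match ht ht h0 hmk (by omega)
                omega
              simp [hfalse]
          rw [List.countP_congr hcongr]
          have : (List.range m).countP (· == 0) = (List.range m).count 0 := rfl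
          rw [this]
          exact List.count_eq_one_of_mem (List.nodup_range) (by rw [List.mem_range]; omega)
        have h2 : ((List.range (l'.length - m)).map (m + ·)).countP (pvP l' t)
            = (List.range (l'.length - m)).countP (pvP (l'.drop m) t) := by
          rw [List.countP_map]
          apply List.countP_congr
          intro j hj
          simp [Function.comp, pvP, List.drop_drop]
        rw [hsplit, List.countP_append, h1, h2, List.length_drop]
        omega
      · rw [if_neg hp]
        have htlf : tl.length ≤ fuel := by omega
        rw [ih _ htlf]
        have heq : (List.range (c :: tl).length).countP (pvP (c :: tl) t)
            = (List.range tl.length).countP (pvP tl t) := by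
          rw [hlc, List.range_succ_eq_map, List.countP_cons]
          have h0 : pvP (c :: tl) t 0 = false := by
            cases h : pvP (c :: tl) t 0
            · rfl
            · exact absurd h hp
          rw [h0, List.countP_map]
          apply List.countP_congr
          intro j hj
          simp [Function.comp, pvP, List.drop_succ_cons]
        rw [heq]

theorem pvCount (L t : List Char) (ht : t ∈ pvTags) :
    PySem.Chars.count L t = (pvS L t).length := by
  have hne : t.isEmpty = false := by
    cases t
    · exact absurd rfl (pvTags_ne_nil [] ht)
    · rfl
  rw [PySem.Chars.count, hne]
  simp only [Bool.false_eq_true, if_false]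
  rw [pvCount_go t ht L.length L le_rfl 0, pvS, List.countP_eq_length_filter]
  omega

theorem pvInfix {L t : List Char} {p : Nat} (h : pvP L t p = true) : t <:+: L := by
  have hp : t <+: L.drop p := List.isPrefixOf_iff_prefix.mp h
  exact hp.isInfix.trans (List.drop_suffix p L).isInfix

theorem pvFind (L t : List Char) (ht : t ∈ pvTags) (p : Nat) (hS : pvS L t = [p]) :
    PySem.Chars.find L t = (p : Int) := by
  have hp : pvP L t p = true := (pvS_mem ht hS).mpr rfl
  have h0 : 0 ≤ PySem.Chars.find L t := (PySem.Chars.find_nonneg_iff L t).mpr (pvInfix hp)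
  obtain ⟨hpre, -⟩ := PySem.Chars.find_spec h0
  have hmatch : pvP L t (PySem.Chars.find L t).toNat = true :=
    List.isPrefixOf_iff_prefix.mpr hpre
  have := (pvS_mem ht hS).mp hmatch
  omega

theorem pvFindFrom (L t : List Char) (ht : t ∈ pvTags) (p k : Nat) (hS : pvS L t = [p])
    (hk : k ≤ L.length) :
    PySem.Chars.findFrom L t (k : Int) none = if k ≤ p then (p : Int) else -1 := by
  rw [PySem.Chars.findFrom_natCast L t k hk]
  have hp : pvP L t p = true := (pvS_mem ht hS).mpr rfl
  by_cases hkp : k ≤ p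
  · have hpl : p < L.length := (pvP_bound ht hp).1
    have hS' : pvS (L.drop k) t = [p - k] := by
      apply pvFilterRange_singleton
      · rw [List.length_drop]; omega
      · show pvP (L.drop k) t (p - k) = true
        have : pvP (L.drop k) t (p - k) = pvP L t p := by
          simp only [pvP, List.drop_drop]
          congr 2
          omega
        rw [this]; exact hp
      · intro y hy hqy
        have hym : pvP L t (k + y) = true := by
          have : pvP (L.drop k) t y = pvP L t (k + y) := by
            simp only [pvP, List.drop_drop]
          rwa [this] at hqy
        have := (pvS_mem ht hS).mp hym
        omega
    rw [pvFind (L.drop k) t ht (p - k) hS']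
    rw [if_neg (by omega)]
    omega
  · have hnomatch : PySem.Chars.find (List.drop k L) t = -1 := by
      rw [PySem.Chars.find_eq_neg_one_iff]
      intro hinf
      have hisin : PySem.Chars.isIn t (List.drop k L) = true :=
        (PySem.Chars.isIn_iff_infix t (List.drop k L)).mpr hinf
      obtain ⟨j, hj⟩ := (PySem.Chars.exists_prefix_drop_iff_isIn t (List.drop k L)).mpr hisin
      have : pvP L t (k + j) = true := by
        have h' : pvP (L.drop k) t j = true := List.isPrefixOf_iff_prefix.mpr hj
        simpa only [pvP, List.drop_drop] using h'
      have := (pvS_mem ht hS).mp this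
      omega
    rw [hnomatch, if_pos rfl, if_neg hkp]

theorem pvB_eq (text : String) :
    has_required_tags_alt text =
      (((List.range text.toList.length).flatMap (pvG text.toList)) == pvTags) := by
  unfold has_required_tags_alt
  have hinner : ∀ (acc : List (List Char)) (i : Nat),
      pvTags.foldl (fun acc tag => if tag.isPrefixOf (text.toList.drop i) then acc ++ [tag] else acc) acc
        = acc ++ pvG text.toList i := by
    intro acc i
    have h := PySem.List.foldl_append_if (fun tag => tag.isPrefixOf (text.toList.drop i))
      (fun t => t) pvTags acc
    simpa [pvG, List.map_id] using h
  simp only [hinner]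
  rw [PySem.List.foldl_append_eq_flatMap]
  simp

theorem pvTags_nodup : pvTags.Nodup := by decide

theorem pvTags_count_one : ∀ t ∈ pvTags, pvTags.count t = 1 := by decide

theorem pvFilter_eq_singleton {α : Type} (l : List α) (q : α → Bool) (t : α) (hnd : l.Nodup)
    (ht : t ∈ l) (h : ∀ u ∈ l, q u = true ↔ u = t) : l.filter q = [t] := by
  induction l with
  | nil => cases ht
  | cons a l' ih =>
    rcases List.nodup_cons.mp hnd with ⟨hna, hnd'⟩
    by_cases hat : a = t
    · subst hat
      have hqa : q a = true := (h a (by simp)).mpr rfl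
      rw [List.filter_cons_of_pos hqa]
      have : l'.filter q = [] := by
        rw [List.filter_eq_nil_iff]
        intro u hu hqu
        exact hna (((h u (by simp [hu])).mp hqu) ▸ hu)
      rw [this]
    · have hqa : q a = false := by
        cases hq : q a
        · rfl
        · exact absurd ((h a (by simp)).mp hq) hat
      rw [List.filter_cons_of_neg (by simp [hqa])]
      refine ih hnd' ?_ (fun u hu => h u (by simp [hu]))
      rcases List.mem_cons.mp ht with h' | h'
      · exact absurd h'.symm hat
      · exact h'

theorem pvG_of_match {L t : List Char} {i : Nat} (ht : t ∈ pvTags) (h : pvP L t i = true) :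
    pvG L i = [t] := by
  apply pvFilter_eq_singleton _ _ _ pvTags_nodup ht
  intro u hu
  constructor
  · intro hq; exact pvUniqueTag hu ht hq h
  · rintro rfl; exact h

theorem pvFlatMap_filter (g : Nat → List (List Char)) (l : List Nat) :
    l.flatMap g = (l.filter (fun i => !(g i).isEmpty)).flatMap g := by
  induction l with
  | nil => rfl
  | cons i l' ih =>
    by_cases hi : (g i).isEmpty = true
    · rw [List.flatMap_cons, List.filter_cons_of_neg (by simp [hi]), ← ih,
        List.isEmpty_iff.mp hi, List.nil_append]
    · rw [List.flatMap_cons, List.filter_cons_of_pos (by simp [hi]), List.flatMap_cons, ← ih]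

theorem pvCountG {L t : List Char} (i : Nat) (ht : t ∈ pvTags) :
    (pvG L i).count t = if pvP L t i then 1 else 0 := by
  by_cases h : pvP L t i = true
  · rw [if_pos h]
    exact List.count_eq_one_of_mem (List.Nodup.filter _ pvTags_nodup) (List.mem_filter.mpr ⟨ht, h⟩)
  · rw [if_neg h, List.count_eq_zero]
    intro hmem
    exact h (List.mem_filter.mp hmem).2

theorem pvCountFlat (L t : List Char) (ht : t ∈ pvTags) (l : List Nat) :
    ((l.flatMap (pvG L)).count t) = l.countP (pvP L t) := by
  induction l with
  | nil => rfl
  | cons i l' ih =>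
    rw [List.flatMap_cons, List.count_append, ih, List.countP_cons, pvCountG i ht]
    by_cases h : pvP L t i = true
    · simp [h]
      omega
    · simp [h]

theorem pvT_mem : pvTags[0] ∈ pvTags ∧ pvTags[1] ∈ pvTags ∧ pvTags[2] ∈ pvTags ∧ pvTags[3] ∈ pvTags := by decide

theorem pvT_lengths : pvTags[0].length = 10 ∧ pvTags[1].length = 11 ∧ pvTags[2].length = 8 ∧ pvTags[3].length = 9 := by decide

-- membership in the position filter
theorem pvT_mem_iff {L : List Char} {p1 p2 p3 p4 : Nat}
    (h1 : pvS L pvTags[0] = [p1]) (h2 : pvS L pvTags[1] = [p2])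
    (h3 : pvS L pvTags[2] = [p3]) (h4 : pvS L pvTags[3] = [p4]) (a : Nat) :
    a ∈ (List.range L.length).filter (fun i => !(pvG L i).isEmpty) ↔
      (a = p1 ∨ a = p2 ∨ a = p3 ∨ a = p4) := by
  rw [List.mem_filter, List.mem_range]
  constructor
  · rintro ⟨ha, hne⟩
    have : pvG L a ≠ [] := by simpa using hne
    obtain ⟨u, hu⟩ := List.exists_mem_of_ne_nil _ this
    have humem := (List.mem_filter.mp hu).1
    have hmatch : pvP L u a = true := (List.mem_filter.mp hu).2
    have h4' : u = pvTags[0] ∨ u = pvTags[1] ∨ u = pvTags[2] ∨ u = pvTags[3] := by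
      simpa [pvTags] using humem
    rcases h4' with rfl | rfl | rfl | rfl
    · exact Or.inl ((pvS_mem pvT_mem.1 h1).mp hmatch)
    · exact Or.inr (Or.inl ((pvS_mem pvT_mem.2.1 h2).mp hmatch))
    · exact Or.inr (Or.inr (Or.inl ((pvS_mem pvT_mem.2.2.1 h3).mp hmatch)))
    · exact Or.inr (Or.inr (Or.inr ((pvS_mem pvT_mem.2.2.2 h4).mp hmatch)))
  · intro hor
    have key : ∀ (t : List Char), t ∈ pvTags → pvS L t = [a] → a < L.length ∧ (!(pvG L a).isEmpty) = true := by
      intro t ht hS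
      have hp : pvP L t a = true := (pvS_mem ht hS).mpr rfl
      refine ⟨(pvP_bound ht hp).1, ?_⟩
      rw [pvG_of_match ht hp]
      rfl
    rcases hor with rfl | rfl | rfl | rfl
    · exact key _ pvT_mem.1 h1
    · exact key _ pvT_mem.2.1 h2
    · exact key _ pvT_mem.2.2.1 h3
    · exact key _ pvT_mem.2.2.2 h4

theorem pvB_true_of_good {L : List Char} {p1 p2 p3 p4 : Nat}
    (h1 : pvS L pvTags[0] = [p1]) (h2 : pvS L pvTags[1] = [p2])
    (h3 : pvS L pvTags[2] = [p3]) (h4 : pvS L pvTags[3] = [p4])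
    (h12 : p1 < p2) (h23 : p2 < p3) (h34 : p3 < p4) :
    (List.range L.length).flatMap (pvG L) = pvTags := by
  rw [pvFlatMap_filter]
  have hT : (List.range L.length).filter (fun i => !(pvG L i).isEmpty) = [p1, p2, p3, p4] := by
    have hpw : ((List.range L.length).filter (fun i => !(pvG L i).isEmpty)).Pairwise (· < ·) :=
      List.Pairwise.sublist List.filter_sublist List.pairwise_lt_range
    refine List.Perm.eq_of_pairwise (le := (· < ·))
      (fun a b _ _ hab hba => absurd hba (Nat.lt_asymm hab)) hpw
      (by simp [List.pairwise_cons]; omega) ?_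
    rw [List.perm_ext_iff_of_nodup (hpw.imp Nat.ne_of_lt) (by simp; omega)]
    intro a
    rw [pvT_mem_iff h1 h2 h3 h4 a]
    simp
  rw [hT]
  have g1 : pvG L p1 = [pvTags[0]] := pvG_of_match pvT_mem.1 ((pvS_mem pvT_mem.1 h1).mpr rfl)
  have g2 : pvG L p2 = [pvTags[1]] := pvG_of_match pvT_mem.2.1 ((pvS_mem pvT_mem.2.1 h2).mpr rfl)
  have g3 : pvG L p3 = [pvTags[2]] := pvG_of_match pvT_mem.2.2.1 ((pvS_mem pvT_mem.2.2.1 h3).mpr rfl)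
  have g4 : pvG L p4 = [pvTags[3]] := pvG_of_match pvT_mem.2.2.2 ((pvS_mem pvT_mem.2.2.2 h4).mpr rfl)
  simp [List.flatMap_cons, g1, g2, g3, g4, pvTags]

theorem pvGood_of_B_true {L : List Char}
    (hB : (List.range L.length).flatMap (pvG L) = pvTags) :
    ∃ p1 p2 p3 p4, pvS L pvTags[0] = [p1] ∧ pvS L pvTags[1] = [p2] ∧
      pvS L pvTags[2] = [p3] ∧ pvS L pvTags[3] = [p4] ∧ p1 < p2 ∧ p2 < p3 ∧ p3 < p4 := by
  -- every tag occurs at exactly one position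
  have hcount : ∀ t ∈ pvTags, (pvS L t).length = 1 := by
    intro t ht
    have := pvCountFlat L t ht (List.range L.length)
    rw [hB, pvTags_count_one t ht] at this
    rw [pvS, ← List.countP_eq_length_filter]
    omega
  obtain ⟨p1, hp1⟩ := List.length_eq_one_iff.mp (hcount _ pvT_mem.1)
  obtain ⟨p2, hp2⟩ := List.length_eq_one_iff.mp (hcount _ pvT_mem.2.1)
  obtain ⟨p3, hp3⟩ := List.length_eq_one_iff.mp (hcount _ pvT_mem.2.2.1)
  obtain ⟨p4, hp4⟩ := List.length_eq_one_iff.mp (hcount _ pvT_mem.2.2.2)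
  refine ⟨p1, p2, p3, p4, hp1, hp2, hp3, hp4, ?_⟩
  -- the filtered position list T
  set T := (List.range L.length).filter (fun i => !(pvG L i).isEmpty) with hTdef
  have hpw : T.Pairwise (· < ·) := List.Pairwise.sublist List.filter_sublist List.pairwise_lt_range
  have hTmem := pvT_mem_iff hp1 hp2 hp3 hp4
  have hsingle : ∀ i ∈ T, ∃ u ∈ pvTags, pvG L i = [u] ∧ pvP L u i = true := by
    intro i hi
    have : pvG L i ≠ [] := by simpa using (List.mem_filter.mp hi).2
    obtain ⟨u, hu⟩ := List.exists_mem_of_ne_nil _ this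
    have humem := (List.mem_filter.mp hu).1
    have hmatch : pvP L u i = true := (List.mem_filter.mp hu).2
    exact ⟨u, humem, pvG_of_match humem hmatch, hmatch⟩
  have hflat : T.flatMap (pvG L) = pvTags := by rw [← pvFlatMap_filter]; exact hB
  -- T has four elements
  have hlen : T.length = 4 := by
    have h1' : (T.flatMap (pvG L)).length = 4 := by rw [hflat]; rfl
    rw [List.length_flatMap] at h1'
    have : (T.map fun i => (pvG L i).length) = T.map fun _ => 1 := by
      apply List.map_congr_left
      intro i hi
      obtain ⟨u, -, hgu, -⟩ := hsingle i hi
      rw [hgu]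
      rfl
    rw [this] at h1'
    simpa using h1'
  clear_value T
  clear hTdef
  rcases T with _ | ⟨q1, T⟩
  · simp at hlen
  rcases T with _ | ⟨q2, T⟩
  · simp at hlen
  rcases T with _ | ⟨q3, T⟩
  · simp at hlen
  rcases T with _ | ⟨q4, T⟩
  · simp at hlen
  rcases T with _ | ⟨q5, T⟩
  swap
  · simp at hlen
  have hq12 : q1 < q2 ∧ q2 < q3 ∧ q3 < q4 := by
    simp [List.pairwise_cons] at hpw
    omega
  obtain ⟨u1, hu1, hgu1, hm1⟩ := hsingle q1 (by simp)
  obtain ⟨u2, hu2, hgu2, hm2⟩ := hsingle q2 (by simp)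
  obtain ⟨u3, hu3, hgu3, hm3⟩ := hsingle q3 (by simp)
  obtain ⟨u4, hu4, hgu4, hm4⟩ := hsingle q4 (by simp)
  rw [List.flatMap_cons, List.flatMap_cons, List.flatMap_cons, List.flatMap_cons,
    List.flatMap_nil, hgu1, hgu2, hgu3, hgu4] at hflat
  simp only [List.append_nil, List.cons_append, List.nil_append] at hflat
  have he1 : u1 = pvTags[0] := by injection hflat
  have hrest := hflat
  injection hrest with _ hrest
  injection hrest with he2 hrest
  injection hrest with he3 hrest
  injection hrest with he4 _
  subst he1; subst he2; subst he3; subst he4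
  have : q1 = p1 := (pvS_mem pvT_mem.1 hp1).mp hm1
  have : q2 = p2 := (pvS_mem pvT_mem.2.1 hp2).mp hm2
  have : q3 = p3 := (pvS_mem pvT_mem.2.2.1 hp3).mp hm3
  have : q4 = p4 := (pvS_mem pvT_mem.2.2.2 hp4).mp hm4
  omega

theorem pvToList : "<thinking>".toList = pvTags[0] ∧ "</thinking>".toList = pvTags[1] ∧
    "<answer>".toList = pvTags[2] ∧ "</answer>".toList = pvTags[3] := by decide

theorem pvA_eval (text : String) (p1 p2 p3 p4 : Nat)
    (h1 : pvS text.toList pvTags[0] = [p1]) (h2 : pvS text.toList pvTags[1] = [p2])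
    (h3 : pvS text.toList pvTags[2] = [p3]) (h4 : pvS text.toList pvTags[3] = [p4]) :
    has_required_tags text = decide (p1 < p2 ∧ p2 < p3 ∧ p3 < p4) := by
  have hm := pvT_mem
  set L := text.toList with hL
  have hp1 : pvP L pvTags[0] p1 = true := (pvS_mem hm.1 h1).mpr rfl
  have hp2 : pvP L pvTags[1] p2 = true := (pvS_mem hm.2.1 h2).mpr rfl
  have hp3 : pvP L pvTags[2] p3 = true := (pvS_mem hm.2.2.1 h3).mpr rfl
  have hp4 : pvP L pvTags[3] p4 = true := (pvS_mem hm.2.2.2 h4).mpr rfl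
  have hb1 := (pvP_bound hm.1 hp1).2
  have hb2 := (pvP_bound hm.2.1 hp2).2
  have hb3 := (pvP_bound hm.2.2.1 hp3).2
  have hb4 := (pvP_bound hm.2.2.2 hp4).2
  rw [pvT_lengths.1] at hb1
  rw [pvT_lengths.2.1] at hb2
  rw [pvT_lengths.2.2.1] at hb3
  rw [pvT_lengths.2.2.2] at hb4
  simp only [has_required_tags, PySem.Str.count_eq, PySem.Str.find_eq, PySem.Str.findFrom_eq,
    pvToList.1, pvToList.2.1, pvToList.2.2.1, pvToList.2.2.2, ← hL]
  rw [pvCount L _ hm.1, pvCount L _ hm.2.1, pvCount L _ hm.2.2.1, pvCount L _ hm.2.2.2,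
    h1, h2, h3, h4]
  rw [if_neg (by simp)]
  rw [pvFind L _ hm.1 p1 h1]
  have hlen1 : (PySem.Str.len "<thinking>" : Int) = 10 := by decide
  have hlen2 : (PySem.Str.len "</thinking>" : Int) = 11 := by decide
  have hlen3 : (PySem.Str.len "<answer>" : Int) = 8 := by decide
  rw [hlen1, hlen2, hlen3]
  -- separation facts
  have hsep12 : p1 < p2 → p1 + 10 ≤ p2 := fun h => by
    have := pvSep_match hm.1 hm.2.1 hp1 hp2 h; rwa [pvT_lengths.1] at this
  have hsep23 : p2 < p3 → p2 + 11 ≤ p3 := fun h => by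
    have := pvSep_match hm.2.1 hm.2.2.1 hp2 hp3 h; rwa [pvT_lengths.2.1] at this
  have hsep34 : p3 < p4 → p3 + 8 ≤ p4 := fun h => by
    have := pvSep_match hm.2.2.1 hm.2.2.2 hp3 hp4 h; rwa [pvT_lengths.2.2.1] at this
  -- step 2
  have hc1 : ((p1 : Int) + 10) = ((p1 + 10 : Nat) : Int) := by push_cast; ring
  rw [hc1, pvFindFrom L _ hm.2.1 p2 (p1 + 10) h2 (by omega)]
  by_cases h12 : p1 < p2
  · rw [if_pos (by omega)]
    have hc2 : ((p2 : Int) + 11) = ((p2 + 11 : Nat) : Int) := by push_cast; ring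
    rw [hc2, pvFindFrom L _ hm.2.2.1 p3 (p2 + 11) h3 (by omega)]
    by_cases h23 : p2 < p3
    · rw [if_pos (by omega)]
      have hc3 : ((p3 : Int) + 8) = ((p3 + 8 : Nat) : Int) := by push_cast; ring
      rw [hc3, pvFindFrom L _ hm.2.2.2 p4 (p3 + 8) h4 (by omega)]
      by_cases h34 : p3 < p4
      · rw [if_pos (by omega)]
        rw [decide_eq_decide]
        omega
      · rw [if_neg (by intro h; exact h34 (by omega))]
        rw [decide_eq_decide]
        omega
    · rw [if_neg (by intro h; exact h23 (by omega))]
      have hc3 : ((-1 : Int) + 8) = ((7 : Nat) : Int) := by norm_num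
      rw [hc3, pvFindFrom L _ hm.2.2.2 p4 7 h4 (by omega)]
      rw [decide_eq_decide]
      omega
  · rw [if_neg (by intro h; exact h12 (by omega))]
    have hc2 : ((-1 : Int) + 11) = ((10 : Nat) : Int) := by norm_num
    rw [hc2, pvFindFrom L _ hm.2.2.1 p3 10 h3 (by omega)]
    by_cases h3' : 10 ≤ p3
    · rw [if_pos h3']
      have hc3 : ((p3 : Int) + 8) = ((p3 + 8 : Nat) : Int) := by push_cast; ring
      rw [hc3, pvFindFrom L _ hm.2.2.2 p4 (p3 + 8) h4 (by omega)]
      by_cases h4' : p3 + 8 ≤ p4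
      · rw [if_pos h4']
        rw [decide_eq_decide]
        omega
      · rw [if_neg h4']
        rw [decide_eq_decide]
        omega
    · rw [if_neg h3']
      have hc3 : ((-1 : Int) + 8) = ((7 : Nat) : Int) := by norm_num
      rw [hc3, pvFindFrom L _ hm.2.2.2 p4 7 h4 (by omega)]
      rw [decide_eq_decide]
      omega

theorem pvA_false_of_bad_count (text : String)
    (h : ¬ ((pvS text.toList pvTags[0]).length = 1 ∧ (pvS text.toList pvTags[1]).length = 1 ∧
            (pvS text.toList pvTags[2]).length = 1 ∧ (pvS text.toList pvTags[3]).length = 1)) :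
    has_required_tags text = false := by
  have hm := pvT_mem
  simp only [has_required_tags, PySem.Str.count_eq,
    pvToList.1, pvToList.2.1, pvToList.2.2.1, pvToList.2.2.2]
  rw [pvCount _ _ hm.1, pvCount _ _ hm.2.1, pvCount _ _ hm.2.2.1, pvCount _ _ hm.2.2.2]
  rw [if_pos (by tauto)]

theorem pvMain (text : String) : has_required_tags text = has_required_tags_alt text := by
  rw [pvB_eq]
  have hm := pvT_mem
  set L := text.toList with hL
  by_cases hc : (pvS L pvTags[0]).length = 1 ∧ (pvS L pvTags[1]).length = 1 ∧
      (pvS L pvTags[2]).length = 1 ∧ (pvS L pvTags[3]).length = 1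
  · obtain ⟨p1, h1⟩ := List.length_eq_one_iff.mp hc.1
    obtain ⟨p2, h2⟩ := List.length_eq_one_iff.mp hc.2.1
    obtain ⟨p3, h3⟩ := List.length_eq_one_iff.mp hc.2.2.1
    obtain ⟨p4, h4⟩ := List.length_eq_one_iff.mp hc.2.2.2
    rw [pvA_eval text p1 p2 p3 p4 h1 h2 h3 h4]
    by_cases hord : p1 < p2 ∧ p2 < p3 ∧ p3 < p4
    · rw [pvB_true_of_good h1 h2 h3 h4 hord.1 hord.2.1 hord.2.2]
      simp [hord.1, hord.2.1, hord.2.2]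
    · have hBf : ((List.range L.length).flatMap (pvG L) == pvTags) = false := by
        cases hbe : ((List.range L.length).flatMap (pvG L) == pvTags)
        · rfl
        · exfalso
          obtain ⟨q1, q2, q3, q4, g1, g2, g3, g4, o12, o23, o34⟩ :=
            pvGood_of_B_true (beq_iff_eq.mp hbe)
          rw [h1] at g1; rw [h2] at g2; rw [h3] at g3; rw [h4] at g4
          have e1 : p1 = q1 := by simpa using g1
          have e2 : p2 = q2 := by simpa using g2
          have e3 : p3 = q3 := by simpa using g3
          have e4 : p4 = q4 := by simpa using g4
          exact hord (by omega)
      rw [hBf]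
      simp [hord]
  · rw [pvA_false_of_bad_count text hc]
    cases hbe : ((List.range L.length).flatMap (pvG L) == pvTags)
    · rfl
    · exfalso
      obtain ⟨q1, q2, q3, q4, g1, g2, g3, g4, -, -, -⟩ :=
        pvGood_of_B_true (beq_iff_eq.mp hbe)
      exact hc ⟨by rw [g1]; rfl, by rw [g2]; rfl, by rw [g3]; rfl, by rw [g4]; rfl⟩

-- ===== VERDICT (by name: the statement is the Claim_ definition above) =====
theorem has_required_tags_spec : Claim_equal_has_required_tags := by
  intro text _
  unfold Spec_has_required_tags
  exact pvMain text
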